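-- pv_equiv track=rewrite | github.com/mistaround/LeetCode | DP/LC2320-count-number-of-ways-to-place-houses.py | countHousePlacements
-- ===== SOURCE A (Python) =====
-- def countHousePlacements(n: int) -> int:
--     dp = [[0,0] for _ in range(n+1)]
--     ans = 0
--     dp[0][0] = 1
--     for i in range(1,n+1):
--         dp[i][0] = dp[i-1][0] + dp[i-1][1]
--         dp[i][1] = dp[i-1][0]
--     ans = dp[n][0] + dp[n][1]
--     ans *= ans
--     return ans % (10**9 + 7)
-- ===== SOURCE B (Python) =====
-- MOD = 10 ** 9 + 7
--
-- def countHousePlacements(n: int) -> int: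
--     # Fibonacci fast doubling: fib(k) returns (F(k) % MOD, F(k+1) % MOD).
--     def fib(k):
--         if k == 0:
--             return (0, 1)
--         a, b = fib(k >> 1)
--         c = a * (2 * b - a) % MOD
--         d = (a * a + b * b) % MOD
--         if k & 1:
--             return (d, (c + d) % MOD)
--         return (c, d)
--     f = fib(n + 2)[0]
--     return f * f % MOD
-- ===== Notes on version B (the rewrite author's own statement) =====
-- stated objective: faster
-- what changed: Replaces the O(n) DP table (answer = Fib(n+2)^2 mod 1e9+7) by Fibonacci fast doubling computed modulo 1e9+7, squaring at the end.
import Mathlib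
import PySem

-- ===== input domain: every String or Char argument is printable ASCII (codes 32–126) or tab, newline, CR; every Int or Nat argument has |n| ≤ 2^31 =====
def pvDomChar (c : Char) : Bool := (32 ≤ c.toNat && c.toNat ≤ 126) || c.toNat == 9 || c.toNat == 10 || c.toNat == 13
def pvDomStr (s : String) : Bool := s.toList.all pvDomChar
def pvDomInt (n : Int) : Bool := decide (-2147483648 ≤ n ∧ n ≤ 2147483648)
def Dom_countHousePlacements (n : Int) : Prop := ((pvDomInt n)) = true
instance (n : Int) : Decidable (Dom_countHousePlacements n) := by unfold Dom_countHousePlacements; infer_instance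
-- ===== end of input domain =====

-- B replaces A's O(n) DP table by Fibonacci fast doubling mod 1e9+7 (O(log n)); return values agree for all n ≥ 0.

-- ===== PORT A =====
-- one body of the for-loop: dp[i][0] = dp[i-1][0] + dp[i-1][1]; dp[i][1] = dp[i-1][0]
-- (the inner two-element lists [a,b] are modelled as pairs (a,b); pyGetD/pySetD are exact
--  under Pre_, where every accessed index is in range)
def chStep (dp : List (Int × Int)) (i : Int) : List (Int × Int) :=
  let prev := PySem.List.pyGetD dp (i - 1) (0, 0)
  PySem.List.pySetD dp i (prev.1 + prev.2, prev.1)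

def countHousePlacements (n : Int) : Int :=
  let dp0 := (PySem.List.pyRange 0 (n + 1) 1).map (fun _ => ((0 : Int), (0 : Int)))
  let dp1 := PySem.List.pySetD dp0 0 (1, (PySem.List.pyGetD dp0 0 (0, 0)).2)
  let dp2 := (PySem.List.pyRange 1 (n + 1) 1).foldl chStep dp1
  let last := PySem.List.pyGetD dp2 n (0, 0)
  PySem.Int.mod ((last.1 + last.2) * (last.1 + last.2)) (10 ^ 9 + 7)

-- ===== PORT B =====
def pvM : Int := 10 ^ 9 + 7

-- fast doubling: fibFD k = (F(k) % MOD, F(k+1) % MOD); k >> 1 on a Nat is k / 2, k & 1 is k % 2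
def fibFD (k : Nat) : Int × Int :=
  if h : k = 0 then (0, 1)
  else
    let p := fibFD (k / 2)
    let c := PySem.Int.mod (p.1 * (2 * p.2 - p.1)) pvM
    let d := PySem.Int.mod (p.1 * p.1 + p.2 * p.2) pvM
    if k % 2 = 1 then (d, PySem.Int.mod (c + d) pvM) else (c, d)
decreasing_by exact Nat.div_lt_self (Nat.pos_of_ne_zero h) one_lt_two

def countHousePlacements_alt (n : Int) : Int :=
  -- Python's fib(n + 2) recurses on a nonnegative int; (n+2).toNat is exact for n ≥ -2
  let f := (fibFD (n + 2).toNat).1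
  PySem.Int.mod (f * f) pvM

-- ===== PRECONDITION & SPEC =====
-- Pre_ excludes n < 0, on which A raises IndexError (dp is empty or shorter than 1 at dp[0][0]).
def Pre_countHousePlacements (n : Int) : Prop := 0 ≤ n
instance (n : Int) : Decidable (Pre_countHousePlacements n) := by unfold Pre_countHousePlacements; infer_instance
def pvWitness_countHousePlacements : Int := 3

def Spec_countHousePlacements (n : Int) (out : Int) : Prop := out = countHousePlacements_alt n
instance (n : Int) (out : Int) : Decidable (Spec_countHousePlacements n out) := by unfold Spec_countHousePlacements; infer_instance

-- ===== CLAIM (what is proved, stated in full; the proofs are below) =====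
def Claim_equal_countHousePlacements : Prop := ∀ (n : Int), Dom_countHousePlacements n → Pre_countHousePlacements n → Spec_countHousePlacements n (countHousePlacements n)

-- ===== LEMMAS AND PROOFS =====

-- the row dp[j] after the loop has passed j: (F(j+1), F(j))
def fibP (j : Nat) : Int × Int := ((Nat.fib (j + 1) : Int), (Nat.fib j : Int))

lemma chStep_spec (m : Nat) (t : List (Int × Int)) :
    chStep ((List.range (m + 1)).map fibP ++ (0, 0) :: t) ((m : Int) + 1)
      = (List.range (m + 2)).map fibP ++ t := by
  have hlen : ((List.range (m + 1)).map fibP).length = m + 1 := by simp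
  have hcast : ((m : Int) + 1) = ((m + 1 : Nat) : Int) := by push_cast; ring
  unfold chStep
  rw [hcast]
  rw [show ((m + 1 : Nat) : Int) - 1 = ((m : Nat) : Int) by push_cast; ring]
  rw [PySem.List.pyGetD_natCast, PySem.List.pySetD_natCast]
  rw [List.getD_append _ _ _ m (by simp)]
  rw [PySem.List.getD_map_range fibP (m + 1) m _ (by omega)]
  rw [List.set_append_right _ _ (by simp)]
  rw [hlen]
  simp only [Nat.sub_self, List.set_cons_zero]
  rw [List.range_succ (n := m + 1), List.map_append]
  simp only [List.map_cons, List.map_nil, List.append_assoc, List.cons_append, List.nil_append]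
  congr 2
  have hfib : (Nat.fib (m + 1 + 1) : Int) = (Nat.fib (m + 1) : Int) + (Nat.fib m : Int) := by
    rw [Nat.fib_add_two]; push_cast; ring
  simp [fibP, hfib]

lemma loopA (m : Nat) : ∀ t : List (Int × Int),
    (PySem.List.pyRange 1 ((m : Int) + 1)).foldl chStep
        (((1, 0) :: List.replicate m ((0 : Int), (0 : Int))) ++ t)
      = (List.range (m + 1)).map fibP ++ t := by
  induction m with
  | zero =>
    intro t
    have h : PySem.List.pyRange 1 (((0 : Nat) : Int) + 1) = [] := by decide
    rw [h]
    simp [fibP]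
  | succ m ih =>
    intro t
    have hc : ((m + 1 : Nat) : Int) + 1 = ((m : Int) + 1) + 1 := by push_cast; ring
    rw [hc, PySem.List.pyRange_one_succ_right (by omega), List.foldl_append]
    have hinit : ((1, 0) :: List.replicate (m + 1) ((0 : Int), (0 : Int))) ++ t
        = ((1, 0) :: List.replicate m ((0 : Int), (0 : Int))) ++ ((0, 0) :: t) := by
      rw [List.replicate_succ']
      simp
    rw [hinit, ih ((0, 0) :: t)]
    simpa using chStep_spec m t

lemma fibFD_spec (k : Nat) :
    fibFD k = ((Nat.fib k : Int) % pvM, (Nat.fib (k + 1) : Int) % pvM) := by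
  induction k using Nat.strong_induction_on with
  | _ k ih =>
    rw [fibFD]
    by_cases h : k = 0
    · subst h
      simp only [dite_true]
      unfold pvM
      decide
    · simp only [h, dite_false]
      have hrec := ih (k / 2) (Nat.div_lt_self (Nat.pos_of_ne_zero h) one_lt_two)
      rw [hrec]
      obtain ⟨m, hm⟩ : ∃ m, k / 2 = m := ⟨k / 2, rfl⟩
      rw [hm]
      have hM : (0 : Int) < pvM := by unfold pvM; norm_num
      have ha : ((Nat.fib m : Int) % pvM) ≡ (Nat.fib m : Int) [ZMOD pvM] :=
        Int.emod_emod_of_dvd _ dvd_rfl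
      have hb : ((Nat.fib (m + 1) : Int) % pvM) ≡ (Nat.fib (m + 1) : Int) [ZMOD pvM] :=
        Int.emod_emod_of_dvd _ dvd_rfl
      have hfle : Nat.fib m ≤ 2 * Nat.fib (m + 1) := by
        have := Nat.fib_le_fib_succ (n := m); omega
      have hceq : ((Nat.fib m : Int) % pvM) * (2 * ((Nat.fib (m + 1) : Int) % pvM) - (Nat.fib m : Int) % pvM) % pvM
          = (Nat.fib (2 * m) : Int) % pvM := by
        have hmod : ((Nat.fib m : Int) % pvM) * (2 * ((Nat.fib (m + 1) : Int) % pvM) - (Nat.fib m : Int) % pvM)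
            % pvM = (Nat.fib m : Int) * (2 * (Nat.fib (m + 1) : Int) - (Nat.fib m : Int)) % pvM :=
          ha.mul ((hb.mul_left 2).sub ha)
        rw [hmod]
        congr 1
        rw [Nat.fib_two_mul]
        push_cast [hfle]
        ring
      have hdeq : (((Nat.fib m : Int) % pvM) * ((Nat.fib m : Int) % pvM) + ((Nat.fib (m + 1) : Int) % pvM) * ((Nat.fib (m + 1) : Int) % pvM)) % pvM
          = (Nat.fib (2 * m + 1) : Int) % pvM := by
        have hmod : (((Nat.fib m : Int) % pvM) * ((Nat.fib m : Int) % pvM) + ((Nat.fib (m + 1) : Int) % pvM) * ((Nat.fib (m + 1) : Int) % pvM))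
            % pvM = ((Nat.fib m : Int) * (Nat.fib m : Int) + (Nat.fib (m + 1) : Int) * (Nat.fib (m + 1) : Int)) % pvM :=
          (ha.mul ha).add (hb.mul hb)
        rw [hmod]
        congr 1
        rw [Nat.fib_two_mul_add_one]
        push_cast
        ring
      simp only [PySem.Int.mod_eq_emod_of_pos hM, hceq, hdeq]
      by_cases hpar : k % 2 = 1
      · have hk : k = 2 * m + 1 := by omega
        simp only [hpar, if_true]
        subst hk
        refine Prod.ext rfl ?_
        have hsum : ((Nat.fib (2 * m) : Int) % pvM + (Nat.fib (2 * m + 1) : Int) % pvM) % pvM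
            = (Nat.fib (2 * m + 1 + 1) : Int) % pvM := by
          have hmod : ((Nat.fib (2 * m) : Int) % pvM + (Nat.fib (2 * m + 1) : Int) % pvM)
              % pvM = ((Nat.fib (2 * m) : Int) + (Nat.fib (2 * m + 1) : Int)) % pvM :=
            (Int.ModEq.add (Int.emod_emod_of_dvd _ dvd_rfl) (Int.emod_emod_of_dvd _ dvd_rfl))
          rw [hmod]
          congr 1
          rw [Nat.fib_add_two]
          push_cast
          ring
        simpa using hsum
      · have hk : k = 2 * m := by omega
        simp only [hpar, if_false]
        subst hk
        exact Prod.ext rfl (by norm_num)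

lemma dp1_eq (m : Nat) :
    PySem.List.pySetD
        ((PySem.List.pyRange 0 ((m : Int) + 1)).map (fun _ => ((0 : Int), (0 : Int)))) 0
        (1, (PySem.List.pyGetD ((PySem.List.pyRange 0 ((m : Int) + 1)).map (fun _ => ((0 : Int), (0 : Int)))) 0 (0, 0)).2)
      = (1, 0) :: List.replicate m ((0 : Int), (0 : Int)) := by
  have hc : ((m : Int) + 1) = ((m + 1 : Nat) : Int) := by push_cast; ring
  rw [hc, PySem.List.pyRange_zero_natCast]
  rw [List.map_const']
  simp only [List.length_map, List.length_range]
  rw [show (0 : Int) = ((0 : Nat) : Int) by norm_num,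
      PySem.List.pyGetD_natCast, PySem.List.pySetD_natCast]
  rw [List.replicate_succ]
  simp

-- ===== VERDICT (by name: the statement is the Claim_ definition above) =====
theorem countHousePlacements_spec : Claim_equal_countHousePlacements := by
  intro n _ hpre
  unfold Spec_countHousePlacements countHousePlacements countHousePlacements_alt
  obtain ⟨m, rfl⟩ : ∃ m : Nat, n = (m : Int) := ⟨n.toNat, (Int.toNat_of_nonneg hpre).symm⟩
  simp only []
  rw [dp1_eq m]
  have hloop : List.foldl chStep ((1, 0) :: List.replicate m ((0 : Int), (0 : Int)))
      (PySem.List.pyRange 1 ((m : Int) + 1)) = (List.range (m + 1)).map fibP := by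
    simpa using loopA m []
  rw [hloop]
  rw [PySem.List.pyGetD_natCast,
      PySem.List.getD_map_range fibP (m + 1) m _ (by omega)]
  have htoNat : ((m : Int) + 2).toNat = m + 2 := by omega
  rw [htoNat, fibFD_spec (m + 2)]
  have hM : (0 : Int) < pvM := by unfold pvM; norm_num
  unfold pvM at hM ⊢
  rw [PySem.Int.mod_eq_emod_of_pos hM, PySem.Int.mod_eq_emod_of_pos hM]
  simp only [fibP]
  have hfib : (Nat.fib (m + 1) : Int) + (Nat.fib m : Int) = (Nat.fib (m + 2) : Int) := by
    rw [Nat.fib_add_two]; push_cast; ring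
  simp only [hfib]
  rw [Int.mul_emod]
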